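-- pv_equiv track=rewrite | github.com/RD1241/NovelToComic | core/sd_generator.py | should_use_pose
-- ===== SOURCE A (Python) =====
-- ACTION_TRIGGER_WORDS = (
--     # Each entry is a stem — startswith() covers all conjugations
--     "attack",   # attack / attacks / attacked / attacking
--     "fight",    # fight  / fights  / fighting  (fought → fo*, miss is ok)
--     "jump",     # jump   / jumps   / jumped    / jumping
--     "dash",     # dash   / dashes  / dashed    / dashing
--     "strik",    # strike / strikes / struck    / striking
--     "slam",     # slam   / slams   / slammed   / slamming
--     "slash",    # slash  / slashes / slashed   / slashing
--     "smash",    # smash  / smashes / smashing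
--     "charg",    # charge / charges / charged   / charging
--     "kick",     # kick   / kicks   / kicked    / kicking
--     "punch",    # punch  / punches / punching
--     "clash",    # clash  / clashes / clashing
--     "battl",    # battle / battles / battling
--     "combat",   # combat (no conjugation needed)
--     "lunge",    # lunge  / lunges  / lunging
-- )
--
-- def should_use_pose(action: str) -> bool:
--     """Return True if the action text implies a dynamic pose is needed.
--
--     Uses stem-prefix matching so that all conjugations are covered:
--       attack / attacks / attacked / attacking  → 'attack'
--       strike / strikes / struck / striking     → 'strik'
--       dash   / dashes  / dashed / dashing      → 'dash'
--       etc.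
--     """
--     action_lower = action.lower()
--     words = action_lower.replace(",", " ").replace(".", " ").split()
--     return any(
--         word.startswith(trigger)
--         for word in words
--         for trigger in ACTION_TRIGGER_WORDS
--     )
-- ===== SOURCE B (Python) =====
-- ACTION_TRIGGER_WORDS = (
--     "attack", "fight", "jump", "dash", "strik",
--     "slam", "slash", "smash", "charg", "kick",
--     "punch", "clash", "battl", "combat", "lunge",
-- )
--
--
-- def should_use_pose(action: str) -> bool:
--     """Single scan: test each stem only at token starts (start of string or
--     right after whitespace / ',' / '.'), without building a word list."""
--     s = action.lower()
--     boundary = True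
--     for i, ch in enumerate(s):
--         if boundary and any(s.startswith(t, i) for t in ACTION_TRIGGER_WORDS):
--             return True
--         boundary = ch.isspace() or ch == "," or ch == "."
--     return False
-- ===== Notes on version B (the rewrite author's own statement) =====
-- stated objective: alternative
-- what changed: Instead of building two replaced copies of the string and a split word list and looping every word against every stem, B does one left-to-right scan of the lowered string, testing the stems only at token-boundary positions (start of string or right after whitespace/','/'.') with an early return.
import Mathlib
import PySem

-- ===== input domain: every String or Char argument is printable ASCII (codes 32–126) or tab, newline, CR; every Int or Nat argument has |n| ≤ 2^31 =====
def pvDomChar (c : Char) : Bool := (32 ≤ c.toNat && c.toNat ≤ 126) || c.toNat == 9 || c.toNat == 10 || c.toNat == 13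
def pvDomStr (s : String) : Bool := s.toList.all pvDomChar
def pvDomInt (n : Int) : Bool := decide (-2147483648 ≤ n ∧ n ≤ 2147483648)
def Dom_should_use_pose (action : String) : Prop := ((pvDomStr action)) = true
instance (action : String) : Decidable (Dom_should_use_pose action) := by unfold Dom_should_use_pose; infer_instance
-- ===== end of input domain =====

-- B replaces A's replace/replace/split word loop by one scan of the lowered string that
-- tests the stems only at token-boundary positions (alternative decomposition, same cost).

-- ===== PORT A =====
def pvTrigs : List (List Char) :=
  ["attack".toList, "fight".toList, "jump".toList, "dash".toList, "strik".toList,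
   "slam".toList, "slash".toList, "smash".toList, "charg".toList, "kick".toList,
   "punch".toList, "clash".toList, "battl".toList, "combat".toList, "lunge".toList]

def should_use_pose (action : String) : Bool :=
  let action_lower := PySem.Chars.lower action.toList
  let words := PySem.Chars.split₀
    (PySem.Chars.replace (PySem.Chars.replace action_lower [','] [' ']) ['.'] [' '])
  words.any (fun w => pvTrigs.any (fun t => PySem.Chars.startswith w t))

-- ===== PORT B =====
def pvDelim (c : Char) : Bool := PySem.Chars.isspace c || c == ',' || c == '.'

def pvGood (s : List Char) : Bool := pvTrigs.any (fun t => t.isPrefixOf s)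

def pvScan : List Char → Bool → Bool
  | [], _ => false
  | c :: rest, atB => (atB && pvGood (c :: rest)) || pvScan rest (pvDelim c)

def should_use_pose_alt (action : String) : Bool :=
  pvScan (PySem.Chars.lower action.toList) true

-- ===== PRECONDITION & SPEC =====
def Spec_should_use_pose (action : String) (out : Bool) : Prop := out = should_use_pose_alt action
instance (action : String) (out : Bool) : Decidable (Spec_should_use_pose action out) := by unfold Spec_should_use_pose; infer_instance

-- ===== CLAIM (what is proved, stated in full; the proofs are below) =====
def Claim_equal_should_use_pose : Prop := ∀ (action : String), Dom_should_use_pose action → Spec_should_use_pose action (should_use_pose action)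

-- ===== LEMMAS AND PROOFS =====

-- the combined effect of A's two single-char replaces
def pvG (c : Char) : Char := if c == ',' || c == '.' then ' ' else c

lemma pv_go_single (a b : Char) :
    ∀ (l : List Char) (fuel : Nat) (acc : List Char), l.length ≤ fuel →
    PySem.Chars.replace.go [a] [b] fuel l acc
      = acc.reverse ++ l.map (fun c => if c == a then b else c) := by
  intro l
  induction l with
  | nil => intro fuel acc _; cases fuel <;> simp [PySem.Chars.replace.go]
  | cons c t ih =>
      intro fuel acc hf
      cases fuel with
      | zero => simp at hf
      | succ f =>
        simp only [PySem.Chars.replace.go]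
        by_cases h : c = a
        · subst h
          simp [List.isPrefixOf, ih f (b :: acc) (by simpa using hf)]
        · have : ([a].isPrefixOf (c :: t)) = false := by
            simp [List.isPrefixOf]; exact fun hh => absurd hh.symm h
          simp [this, ih f (c :: acc) (by simpa using hf), h]

lemma pv_replace_single (s : List Char) (a b : Char) :
    PySem.Chars.replace s [a] [b] = s.map (fun c => if c == a then b else c) := by
  simp [PySem.Chars.replace, pv_go_single a b s s.length []]

lemma pv_replace2 (s : List Char) :
    PySem.Chars.replace (PySem.Chars.replace s [','] [' ']) ['.'] [' '] = s.map pvG := by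
  rw [pv_replace_single, pv_replace_single, List.map_map]
  apply List.map_congr_left
  intro c _
  by_cases h1 : c = ',' <;> by_cases h2 : c = '.' <;> simp [pvG, Function.comp, h1, h2]

lemma pv_isspace_g (c : Char) : PySem.Chars.isspace (pvG c) = pvDelim c := by
  unfold pvG pvDelim
  by_cases h1 : c = ','
  · subst h1; decide
  · by_cases h2 : c = '.'
    · subst h2; decide
    · have e1 : (c == ',') = false := by simp [h1]
      have e2 : (c == '.') = false := by simp [h2]
      simp only [e1, e2, Bool.or_false, Bool.false_eq_true, if_false]

-- structural equations of split₀.go (its auto equation is a single eq_def)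
lemma pv_go_nil (cur : List Char) (acc : List (List Char)) :
    PySem.Chars.split₀.go [] cur acc
      = if cur.isEmpty then acc.reverse else (cur.reverse :: acc).reverse := by
  rw [PySem.Chars.split₀.go.eq_def]

lemma pv_go_cons (c : Char) (rest cur : List Char) (acc : List (List Char)) :
    PySem.Chars.split₀.go (c :: rest) cur acc
      = if PySem.Chars.isspace c then
          (if cur.isEmpty then PySem.Chars.split₀.go rest [] acc
           else PySem.Chars.split₀.go rest [] (cur.reverse :: acc))
        else PySem.Chars.split₀.go rest (c :: cur) acc := by
  rw [PySem.Chars.split₀.go.eq_def]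

-- split₀.go's accumulator is append-only
lemma pv_split_go_acc :
    ∀ (ms cur : List Char) (acc : List (List Char)),
    PySem.Chars.split₀.go ms cur acc = acc.reverse ++ PySem.Chars.split₀.go ms cur [] := by
  intro ms
  induction ms with
  | nil =>
      intro cur acc
      rw [pv_go_nil, pv_go_nil]
      by_cases h : cur.isEmpty <;> simp [h]
  | cons c rest ih =>
      intro cur acc
      rw [pv_go_cons, pv_go_cons]
      by_cases hs : PySem.Chars.isspace c
      · by_cases hc : cur.isEmpty
        · simp only [hs, if_true, hc]
          exact ih [] acc
        · simp only [hs, if_true, hc, Bool.false_eq_true, if_false]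
          rw [ih [] (cur.reverse :: acc), ih [] [cur.reverse]]
          simp
      · simp only [hs, Bool.false_eq_true, if_false]
        exact ih (c :: cur) acc

-- any respects pointwise agreement on members
lemma pv_any_congr {α : Type} {l : List α} {p q : α → Bool}
    (h : ∀ a ∈ l, p a = q a) : l.any p = l.any q := by
  induction l with
  | nil => rfl
  | cons a t ih =>
      simp only [List.any_cons, h a (by simp), ih (fun b hb => h b (by simp [hb]))]

-- every trigger stem is delimiter-free
lemma pv_trigs_free : ∀ t ∈ pvTrigs, t.all (fun x => !pvDelim x) = true := by decide

lemma pv_prefix_split (t p r : List Char) (c : Char)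
    (hfree : t.all (fun x => !pvDelim x) = true) (hc : pvDelim c = true) :
    t.isPrefixOf (p ++ c :: r) = t.isPrefixOf p := by
  induction t generalizing p with
  | nil => simp [List.isPrefixOf]
  | cons h t' ih =>
      cases p with
      | nil =>
          simp only [List.nil_append, List.isPrefixOf]
          have : (h == c) = false := by
            simp only [List.all_cons, Bool.and_eq_true, Bool.not_eq_true'] at hfree
            simp only [beq_eq_false_iff_ne, ne_eq]
            intro hh; rw [hh] at hfree; rw [hc] at hfree; simp at hfree
          simp [this]
      | cons q p' =>
          simp only [List.cons_append, List.isPrefixOf]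
          simp only [List.all_cons, Bool.and_eq_true] at hfree
          rw [ih p' hfree.2]

lemma pv_good_split (p r : List Char) (c : Char) (hc : pvDelim c = true) :
    pvGood (p ++ c :: r) = pvGood p := by
  unfold pvGood
  exact pv_any_congr (fun t ht => pv_prefix_split t p r c (pv_trigs_free t ht) hc)

lemma pv_good_delim (r : List Char) (c : Char) (hc : pvDelim c = true) :
    pvGood (c :: r) = false := by
  have h0 : pvGood ([] : List Char) = false := by decide
  have := pv_good_split [] r c hc
  rw [List.nil_append] at this
  rw [this, h0]

-- the heart: A's token loop over (map pvG ls) equals B's boundary scan over ls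
lemma pv_main (ls : List Char) :
    (∀ p : List Char, p ≠ [] →
      ((PySem.Chars.split₀.go (ls.map pvG) p.reverse []).any pvGood
        = (pvGood (p ++ ls) || pvScan ls false)))
    ∧ ((PySem.Chars.split₀.go (ls.map pvG) [] []).any pvGood = pvScan ls true) := by
  induction ls with
  | nil =>
      constructor
      · intro p hp
        rw [List.map_nil, pv_go_nil]
        simp [pvScan, hp]
      · rw [List.map_nil, pv_go_nil]
        simp [pvScan]
  | cons c r ih =>
      by_cases hd : pvDelim c = true
      · have hs : PySem.Chars.isspace (pvG c) = true := by rw [pv_isspace_g]; exact hd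
        constructor
        · intro p hp
          have hne : p.reverse.isEmpty = false := by simp [hp]
          rw [List.map_cons, pv_go_cons]
          simp only [hs, if_true, hne, Bool.false_eq_true, if_false]
          rw [pv_split_go_acc (r.map pvG) [] [p.reverse.reverse]]
          simp only [List.any_append, List.any_cons, List.any_nil, List.reverse_reverse,
            List.reverse_cons, List.reverse_nil, List.nil_append, Bool.or_false]
          rw [ih.2]
          simp [pvScan, hd, pv_good_split p r c hd, pv_good_delim r c hd]
        · rw [List.map_cons, pv_go_cons]
          simp only [hs, if_true, List.isEmpty_nil]
          rw [ih.2]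
          simp [pvScan, hd, pv_good_delim r c hd]
      · have hs : PySem.Chars.isspace (pvG c) = false := by
          rw [pv_isspace_g]; simpa using hd
        have hdb : pvDelim c = false := by simpa using hd
        have hgc : pvG c = c := by
          unfold pvDelim at hdb
          unfold pvG
          simp only [Bool.or_eq_false_iff] at hdb
          simp [hdb.1.2, hdb.2]
        have hs' : PySem.Chars.isspace c = false := by rw [← hgc]; exact hs
        constructor
        · intro p hp
          rw [List.map_cons, pv_go_cons]
          simp only [hgc, hs', Bool.false_eq_true, if_false]
          have hrw : c :: p.reverse = (p ++ [c]).reverse := by simp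
          rw [hrw, ih.1 (p ++ [c]) (by simp)]
          simp [pvScan, hdb]
        · rw [List.map_cons, pv_go_cons]
          simp only [hgc, hs', Bool.false_eq_true, if_false]
          have hrw : (c :: ([] : List Char)) = ([c] : List Char).reverse := by simp
          rw [hrw, ih.1 [c] (by simp)]
          simp [pvScan, hdb]

-- ===== VERDICT (by name: the statement is the Claim_ definition above) =====
theorem should_use_pose_spec : Claim_equal_should_use_pose := by
  intro action _
  unfold Spec_should_use_pose should_use_pose should_use_pose_alt
  simp only [pv_replace2, PySem.Chars.split₀]
  exact (pv_main (PySem.Chars.lower action.toList)).2
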